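-- pv_equiv track=rewrite | github.com/davaureli/DataScience_Publication-Graph | Distances.py | get_keynode
-- ===== SOURCE A (Python) =====
-- def get_keynode(destination_nodes, similarity_dist):
--     new_dest = []
--     for dest in destination_nodes:
--         enter = False
--         for k,v in similarity_dist.items():
--             if dest in v:
--                 new_dest.append(k)
--                 enter = True
--                 break
--         if enter == False:
--             new_dest.append(dest)
--     return new_dest
-- ===== SOURCE B (Python) =====
-- def get_keynode(destination_nodes, similarity_dist):
--     # Reverse index: element -> first key whose value list contains it.
--     first_key = {}
--     for k, v in similarity_dist.items():
--         for x in v: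
--             first_key.setdefault(x, k)
--     return [first_key.get(d, d) for d in destination_nodes]
-- ===== Notes on version B (the rewrite author's own statement) =====
-- stated objective: faster
-- what changed: Instead of scanning the whole dict (and each value list) for every destination, B builds a reverse element-to-first-key index once with setdefault and answers each destination by a single dict lookup.
import Mathlib
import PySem

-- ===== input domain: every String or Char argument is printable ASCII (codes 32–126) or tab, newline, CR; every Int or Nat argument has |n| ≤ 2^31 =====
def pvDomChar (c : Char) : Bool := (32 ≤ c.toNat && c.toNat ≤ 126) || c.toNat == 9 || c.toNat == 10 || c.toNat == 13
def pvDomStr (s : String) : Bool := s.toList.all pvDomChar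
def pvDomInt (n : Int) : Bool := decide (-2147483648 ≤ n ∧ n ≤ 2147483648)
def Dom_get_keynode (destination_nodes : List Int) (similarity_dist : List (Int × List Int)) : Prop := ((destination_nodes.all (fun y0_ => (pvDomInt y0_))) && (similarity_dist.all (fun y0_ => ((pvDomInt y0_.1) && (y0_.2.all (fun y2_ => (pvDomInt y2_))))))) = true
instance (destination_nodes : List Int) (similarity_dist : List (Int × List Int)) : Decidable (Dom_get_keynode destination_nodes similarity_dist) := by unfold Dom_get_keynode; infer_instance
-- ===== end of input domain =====

-- B replaces A's per-destination scan of the whole dict by a reverse element→first-key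
-- index built once; objective: faster (asymptotic).

-- ===== PORT A =====
-- inner 'for k,v in similarity_dist.items(): if dest in v: append k; break' with the
-- enter flag: the first key whose value list contains dest, as an Option
def pvFirstKey (dest : Int) : List (Int × List Int) → Option Int
  | [] => none
  | (k, v) :: rest => if v.contains dest then some k else pvFirstKey dest rest

def get_keynode (destination_nodes : List Int) (similarity_dist : List (Int × List Int)) : List Int :=
  destination_nodes.foldl (fun new_dest dest =>
    match pvFirstKey dest similarity_dist with
    | some k => new_dest ++ [k]        -- enter = True: appended k, broke out
    | none => new_dest ++ [dest]) []   -- enter stayed False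

-- ===== PORT B =====
-- first_key = {}; for k,v: for x in v: first_key.setdefault(x, k)
def pvIndex (similarity_dist : List (Int × List Int)) : PySem.Dict Int Int :=
  similarity_dist.foldl
    (fun d kv => kv.2.foldl (fun d x => d.setdefault x kv.1) d)
    PySem.Dict.empty

def get_keynode_alt (destination_nodes : List Int) (similarity_dist : List (Int × List Int)) : List Int :=
  destination_nodes.map (fun dest => (pvIndex similarity_dist).getD dest dest)

-- ===== PRECONDITION & SPEC =====
def Spec_get_keynode (destination_nodes : List Int) (similarity_dist : List (Int × List Int)) (out : List Int) : Prop := out = get_keynode_alt destination_nodes similarity_dist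
instance (destination_nodes : List Int) (similarity_dist : List (Int × List Int)) (out : List Int) : Decidable (Spec_get_keynode destination_nodes similarity_dist out) := by unfold Spec_get_keynode; infer_instance

-- ===== CLAIM (what is proved, stated in full; the proofs are below) =====
def Claim_equal_get_keynode : Prop := ∀ (destination_nodes : List Int) (similarity_dist : List (Int × List Int)), Dom_get_keynode destination_nodes similarity_dist → Spec_get_keynode destination_nodes similarity_dist (get_keynode destination_nodes similarity_dist)

-- ===== LEMMAS AND PROOFS =====

-- the inner setdefault loop: an existing binding survives, a missing x gets k iff x ∈ v
lemma get?_setdefault_loop (v : List Int) (d : PySem.Dict Int Int) (k x : Int) :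
    (v.foldl (fun d y => d.setdefault y k) d).get? x =
      ((d.get? x).orElse (fun _ => if v.contains x then some k else none)) := by
  induction v generalizing d with
  | nil => cases hg : d.get? x <;> simp [hg, Option.orElse]
  | cons y ys ih =>
    simp only [List.foldl_cons, ih]
    by_cases hxy : x = y
    · subst hxy
      by_cases hc : d.contains x = true
      · rw [PySem.Dict.setdefault_of_contains _ _ hc]
        rw [PySem.Dict.contains_eq_isSome_get?] at hc
        cases hg : d.get? x with
        | none => rw [hg] at hc; simp at hc
        | some w => simp [hg, Option.orElse]
      · rw [PySem.Dict.setdefault_of_not_contains _ _ (by simpa using hc)]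
        rw [PySem.Dict.contains_eq_isSome_get?] at hc
        cases hg : d.get? x with
        | none => simp [Option.orElse]
        | some w => rw [hg] at hc; simp at hc
    · by_cases hc : d.contains y = true
      · rw [PySem.Dict.setdefault_of_contains _ _ hc]
        cases hg : d.get? x <;> simp [hg, Option.orElse, hxy]
      · rw [PySem.Dict.setdefault_of_not_contains _ _ (by simpa using hc)]
        rw [PySem.Dict.get?_insert]
        simp only [if_neg hxy]
        cases hg : d.get? x <;> simp [hg, Option.orElse, hxy]

-- the whole index build: lookup of x is the first key whose value list contains x
lemma get?_index_loop (sd : List (Int × List Int)) (d : PySem.Dict Int Int) (x : Int) :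
    (sd.foldl (fun d kv => kv.2.foldl (fun d y => d.setdefault y kv.1) d) d).get? x =
      ((d.get? x).orElse (fun _ => pvFirstKey x sd)) := by
  induction sd generalizing d with
  | nil => cases hg : d.get? x <;> simp [hg, pvFirstKey, Option.orElse]
  | cons kv rest ih =>
    simp only [List.foldl_cons, ih, get?_setdefault_loop]
    cases hg : d.get? x with
    | some w => simp [Option.orElse]
    | none =>
      simp only [Option.orElse, pvFirstKey]
      by_cases h : x ∈ kv.2 <;> simp [h]

lemma index_getD (sd : List (Int × List Int)) (x : Int) :
    (pvIndex sd).getD x x = (pvFirstKey x sd).getD x := by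
  rw [PySem.Dict.getD_eq_get?_getD]
  unfold pvIndex
  rw [get?_index_loop]
  cases pvFirstKey x sd <;> simp [Option.orElse]

-- A's append-foldl is the map of the per-element answer
lemma foldl_append_match (dn : List Int) (sd : List (Int × List Int)) (acc : List Int) :
    (dn.foldl (fun new_dest dest =>
      match pvFirstKey dest sd with
      | some k => new_dest ++ [k]
      | none => new_dest ++ [dest]) acc) =
    acc ++ dn.map (fun dest => (pvFirstKey dest sd).getD dest) := by
  induction dn generalizing acc with
  | nil => simp
  | cons d ds ih =>
    simp only [List.foldl_cons, List.map_cons, ih]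
    cases h : pvFirstKey d sd <;> simp

-- ===== VERDICT (by name: the statement is the Claim_ definition above) =====
theorem get_keynode_spec : Claim_equal_get_keynode := by
  intro dn sd _
  unfold Spec_get_keynode get_keynode get_keynode_alt
  rw [foldl_append_match]
  simp [index_getD]
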